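-- pv_equiv track=rewrite | github.com/harshsaini697/CodingPractice | work_schedule_nishant.py | work_sched
-- ===== SOURCE A (Python) =====
-- def work_sched(s, max_week, max_day):
--     results = []
--     cur_week = 0
--     for i in range(len(s)):
--         if s[i].isdigit():
--             cur_week += int(s[i])
--     recurse(s, 0, "", cur_week, max_week, max_day, results)
--     return results
--
-- def recurse(s, start, partial, cur_week, max_week, max_day, results):
--     if cur_week == max_week and len(partial) == len(s):
--         results.append(partial)
--         return
--     elif cur_week>max_week or start>=len(s):
--         return
--     if s[start] == "?":
--         for i in range(0, max_day+1):
--             recurse(s, start+1, partial+str(i), cur_week+i, max_week, max_day, results)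
--     else:
--         recurse(s, start+1, partial+s[start], cur_week, max_week, max_day, results)
-- ===== SOURCE B (Python) =====
-- def work_sched(s, max_week, max_day):
--     # split s into the '?'-free segments between the '?'s (one pass)
--     segs = []
--     cur = []
--     for c in s:
--         if c == '?':
--             segs.append(''.join(cur))
--             cur = []
--         else:
--             cur.append(c)
--     segs.append(''.join(cur))
--     base = sum(int(c) for c in s if c.isdigit())
--     hi = min(max_day, 9)
--     out = []
--
--     def go(rest, need, acc):
--         if not rest:
--             if need == 0:
--                 out.append(acc)
--             return
--         restmax = hi * (len(rest) - 1)
--         for d in range(max(0, need - restmax), min(hi, need) + 1):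
--             go(rest[1:], need - d, acc + str(d) + rest[0])
--
--     go(segs[1:], max_week - base, segs[0])
--     return out
-- ===== Notes on version B (the rewrite author's own statement) =====
-- stated objective: faster
-- what changed: A recurses character-by-character over the whole string trying every digit 0..max_day at each '?'; B splits the string once into its '?'-free segments and recurses over segments only, restricting each '?' to the digit range still able to reach the required sum (suffix-capacity pruning), so dead branches are never entered.
-- outside the precondition, e.g. on work_sched('?a', 10, 10): A returns ['10'], B returns []
import Mathlib
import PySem

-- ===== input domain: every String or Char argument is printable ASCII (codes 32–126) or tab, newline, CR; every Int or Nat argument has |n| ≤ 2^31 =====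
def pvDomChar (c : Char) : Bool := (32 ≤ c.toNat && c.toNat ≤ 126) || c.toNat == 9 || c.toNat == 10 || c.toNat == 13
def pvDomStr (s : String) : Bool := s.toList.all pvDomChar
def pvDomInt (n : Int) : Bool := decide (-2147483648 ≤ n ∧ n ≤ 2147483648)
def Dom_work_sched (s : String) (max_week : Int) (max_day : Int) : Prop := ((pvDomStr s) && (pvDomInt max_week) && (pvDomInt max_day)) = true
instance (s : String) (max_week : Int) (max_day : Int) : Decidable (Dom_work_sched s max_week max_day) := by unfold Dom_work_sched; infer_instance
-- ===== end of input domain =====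

-- B replaces A's per-character recursion over the whole string (branching on every digit
-- 0..max_day at each '?') by a recursion over the '?'-free segments that only tries digits
-- whose remaining sum is still achievable (suffix-bound pruning); dead branches are never entered.

-- ===== PORT A =====
-- helper of A: the recursive enumerator 'recurse' (results list threaded as accumulator)
def recurseA (s : List Char) (max_week max_day : Int) (start : Nat) (part : List Char) (cur_week : Int) (results : List (List Char)) : List (List Char) :=
  if cur_week = max_week ∧ part.length = s.length then results ++ [part]
  else if _h : cur_week > max_week ∨ s.length ≤ start then results
  else if s.getD start ' ' = '?' then
    -- for i in range(0, max_day+1): recurse(..., partial+str(i), cur_week+i, ...)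
    (PySem.List.pyRange 0 (max_day + 1) 1).foldl
      (fun r i => recurseA s max_week max_day (start + 1) (part ++ (PySem.Int.toStr i).toList) (cur_week + i) r) results
  else recurseA s max_week max_day (start + 1) (part ++ [s.getD start ' ']) cur_week results
termination_by s.length - start
decreasing_by all_goals omega

def work_sched (s : String) (max_week : Int) (max_day : Int) : List String :=
  -- cur_week = sum of int(s[i]) over the digit characters of s (int(c) = code(c) - 48, exact on digits)
  let cur_week : Int := s.toList.foldl (fun a c => if PySem.Chars.isdigit c then a + ((c.toNat : Int) - 48) else a) 0
  (recurseA s.toList max_week max_day 0 [] cur_week []).map String.ofList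

-- ===== PORT B =====
-- helper of B: the pruned recursion 'go' over the remaining '?'-free segments
def goB (hi : Int) : List (List Char) → Int → List Char → List (List Char) → List (List Char)
  | [], need, acc, out => if need = 0 then out ++ [acc] else out
  | p :: rest, need, acc, out =>
      let restmax := hi * (rest.length : Int)
      (PySem.List.pyRange (max 0 (need - restmax)) (min hi need + 1) 1).foldl
        (fun o d => goB hi rest (need - d) (acc ++ (PySem.Int.toStr d).toList ++ p) o) out

-- helper of B: one pass splitting s into its '?'-free segments (state = (segs, cur))
def segsB (s : List Char) : List (List Char) :=
  let st := s.foldl (fun (p : List (List Char) × List Char) c =>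
      if c = '?' then (p.1 ++ [p.2], []) else (p.1, p.2 ++ [c])) ([], [])
  st.1 ++ [st.2]

def work_sched_alt (s : String) (max_week : Int) (max_day : Int) : List String :=
  let segs := segsB s.toList
  let base : Int := ((s.toList.filter (fun c => PySem.Chars.isdigit c)).map (fun c => (c.toNat : Int) - 48)).sum
  let hi := min max_day 9
  (goB hi segs.tail (max_week - base) (segs.headD []) []).map String.ofList

-- ===== PRECONDITION & SPEC =====
-- Pre_ excludes inputs where s contains '?' AND max_day > 9: there A's fills str(i) for i ≥ 10 are
-- multi-character, which corrupts its length-based completion check (it can emit truncated strings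
-- such as "10" for s = "?a") — an artefact outside the single-digit-day domain of the task; B caps
-- fill digits at 9 and returns only genuine single-digit fillings there.
def Pre_work_sched (s : String) (max_week : Int) (max_day : Int) : Prop :=
  '?' ∈ s.toList → max_day ≤ 9
instance (s : String) (max_week : Int) (max_day : Int) : Decidable (Pre_work_sched s max_week max_day) := by unfold Pre_work_sched; infer_instance

def pvWitness_work_sched : String × Int × Int := ("?2?", 5, 3)

def Spec_work_sched (s : String) (max_week : Int) (max_day : Int) (out : List String) : Prop := out = work_sched_alt s max_week max_day
instance (s : String) (max_week : Int) (max_day : Int) (out : List String) : Decidable (Spec_work_sched s max_week max_day out) := by unfold Spec_work_sched; infer_instance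

-- ===== CLAIM (what is proved, stated in full; the proofs are below) =====
def Claim_equal_work_sched : Prop := ∀ (s : String) (max_week : Int) (max_day : Int), Dom_work_sched s max_week max_day → Pre_work_sched s max_week max_day → Spec_work_sched s max_week max_day (work_sched s max_week max_day)

-- ===== LEMMAS AND PROOFS =====

-- Mathematical intermediary for A: the list of fillings of the remaining characters
def Fspec (maxd : Int) : List Char → Int → List (List Char)
  | [], need => if need = 0 then [[]] else []
  | c :: t, need =>
      if need < 0 then []
      else if c = '?' then
        (PySem.List.pyRange 0 (maxd + 1) 1).flatMap
          (fun i => (Fspec maxd t (need - i)).map (fun f => (PySem.Int.toStr i).toList ++ f))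
      else (Fspec maxd t need).map (fun f => c :: f)

-- Mathematical intermediary for B: the fillings of the remaining segments
def Hspec (hi : Int) : List (List Char) → Int → List (List Char)
  | [], need => if need = 0 then [[]] else []
  | p :: rest, need =>
      (PySem.List.pyRange (max 0 (need - hi * (rest.length : Int))) (min hi need + 1) 1).flatMap
        (fun d => (Hspec hi rest (need - d)).map (fun f => (PySem.Int.toStr d).toList ++ p ++ f))

-- structural splitting of a char list at its '?'s
def mkParts : List Char → List (List Char)
  | [] => [[]]
  | c :: t => if c = '?' then [] :: mkParts t
              else (c :: (mkParts t).headD []) :: (mkParts t).tail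

-- glue the segments back with '?' between them
def joinQ : List (List Char) → List Char
  | [] => []
  | [p] => p
  | p :: q :: rest => p ++ '?' :: joinQ (q :: rest)

lemma foldl_flatMap_of {α : Type} (F : List α → Int → List α) (g : Int → List α) :
    ∀ (l : List Int), (∀ acc x, x ∈ l → F acc x = acc ++ g x) →
      ∀ init : List α, l.foldl F init = init ++ l.flatMap g := by
  intro l
  induction l with
  | nil => intro _ init; simp
  | cons x t ih =>
    intro h init
    rw [List.foldl_cons, h init x List.mem_cons_self,
        ih (fun acc y hy => h acc y (List.mem_cons_of_mem _ hy))]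
    simp

lemma Fspec_neg (maxd : Int) (l : List Char) (need : Int) (h : need < 0) :
    Fspec maxd l need = [] := by
  cases l with
  | nil => simp [Fspec]; omega
  | cons c t => simp [Fspec, h]

lemma Fspec_prefix (maxd : Int) (p r : List Char) (need : Int) (hp : '?' ∉ p) :
    Fspec maxd (p ++ r) need = (Fspec maxd r need).map (p ++ ·) := by
  induction p generalizing need with
  | nil => simp
  | cons c t ih =>
    by_cases hn : need < 0
    · rw [Fspec_neg _ _ _ hn, Fspec_neg _ _ _ hn]; rfl
    · have hc : c ≠ '?' := by intro h; exact hp (h ▸ List.mem_cons_self)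
      have ht : '?' ∉ t := fun h => hp (List.mem_cons_of_mem _ h)
      rw [List.cons_append]
      simp only [Fspec, if_neg hn, if_neg hc, ih _ ht, List.map_map]
      rfl

lemma toStr_digit_len (i : Int) (h0 : 0 ≤ i) (h9 : i ≤ 9) :
    (PySem.Int.toStr i).toList.length = 1 := by
  interval_cases i <;> decide

lemma Fspec_cons (maxd : Int) (c : Char) (t : List Char) (need : Int) :
    Fspec maxd (c :: t) need = if need < 0 then []
      else if c = '?' then
        (PySem.List.pyRange 0 (maxd + 1) 1).flatMap
          (fun i => (Fspec maxd t (need - i)).map (fun f => (PySem.Int.toStr i).toList ++ f))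
      else (Fspec maxd t need).map (fun f => c :: f) := rfl

lemma recurseA_eq (s : List Char) (maxw maxd : Int) :
    ∀ (n start : Nat) (part : List Char) (cur : Int) (res : List (List Char)),
      s.length - start = n → part.length = start → start ≤ s.length →
      (∀ c ∈ s.drop start, c = '?' → maxd ≤ 9) →
      recurseA s maxw maxd start part cur res
        = res ++ (Fspec maxd (s.drop start) (maxw - cur)).map (part ++ ·) := by
  intro n
  induction n with
  | zero =>
    intro start part cur res hn hpart hle _
    have hs : start = s.length := by omega
    have hd : s.drop start = [] := List.drop_of_length_le (by omega)
    rw [recurseA, hd]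
    by_cases hcur : cur = maxw
    · rw [if_pos ⟨hcur, by omega⟩]
      simp [Fspec, hcur]
    · rw [if_neg (fun h => hcur h.1), dif_pos (Or.inr (by omega))]
      have : maxw - cur ≠ 0 := by omega
      simp [Fspec, this]
  | succ n ih =>
    intro start part cur res hn hpart hle hqs
    have hstart : start < s.length := by omega
    have hget : s.getD start ' ' = s[start] := List.getD_eq_getElem s ' ' hstart
    have hdrop : s.drop start = s[start] :: s.drop (start + 1) :=
      (List.getElem_cons_drop hstart).symm
    rw [recurseA, if_neg (fun h => by omega : ¬(cur = maxw ∧ part.length = s.length))]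
    by_cases hcur : cur > maxw
    · rw [dif_pos (Or.inl hcur), hdrop, Fspec_neg _ _ _ (by omega)]
      simp
    · rw [dif_neg (by omega : ¬(cur > maxw ∨ s.length ≤ start))]
      by_cases hq : s.getD start ' ' = '?'
      · rw [if_pos hq]
        have hq' : s[start] = '?' := hget ▸ hq
        have hmd : maxd ≤ 9 :=
          hqs (s[start]) (by rw [hdrop]; exact List.mem_cons_self) hq'
        rw [foldl_flatMap_of _ (fun i => (Fspec maxd (s.drop (start + 1)) (maxw - (cur + i))).map
              ((part ++ (PySem.Int.toStr i).toList) ++ ·)) _ ?_]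
        · rw [hdrop, Fspec_cons, if_neg (by omega : ¬ maxw - cur < 0), if_pos hq',
            List.map_flatMap]
          congr 1
          apply List.flatMap_congr
          intro i _
          have harith : maxw - (cur + i) = maxw - cur - i := by ring
          rw [harith, List.map_map]
          apply List.map_congr_left
          intro f _
          simp [List.append_assoc]
        · intro r i hi
          rw [PySem.List.mem_pyRange_one] at hi
          exact ih (start + 1) (part ++ (PySem.Int.toStr i).toList) (cur + i) r (by omega)
            (by rw [List.length_append, toStr_digit_len i hi.1 (by omega)]; omega) (by omega)
            (fun c hc hc' => hqs c (by rw [hdrop]; exact List.mem_cons_of_mem _ hc) hc')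
      · rw [if_neg hq]
        rw [ih (start + 1) (part ++ [s.getD start ' ']) cur res (by omega)
          (by rw [List.length_append]; simp [hpart]) (by omega)
          (fun c hc hc' => hqs c (by rw [hdrop]; exact List.mem_cons_of_mem _ hc) hc')]
        have hq' : ¬ s[start] = '?' := hget ▸ hq
        rw [hdrop, Fspec_cons, if_neg (by omega : ¬ maxw - cur < 0), if_neg hq',
          List.map_map]
        congr 1
        apply List.map_congr_left
        intro f _
        simp only [List.append_assoc, List.singleton_append, Function.comp_apply]
        rw [show part ++ s.getD start ' ' :: f = part ++ s[start] :: f from by rw [hget]]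

lemma goB_eq (hi : Int) (parts : List (List Char)) :
    ∀ (need : Int) (acc : List Char) (out : List (List Char)),
      goB hi parts need acc out = out ++ (Hspec hi parts need).map (acc ++ ·) := by
  induction parts with
  | nil =>
    intro need acc out
    by_cases hn : need = 0 <;> simp [goB, Hspec, hn]
  | cons p rest ih =>
    intro need acc out
    rw [show goB hi (p :: rest) need acc out = List.foldl
        (fun o d => goB hi rest (need - d) (acc ++ (PySem.Int.toStr d).toList ++ p) o) out
        (PySem.List.pyRange (max 0 (need - hi * (rest.length : Int))) (min hi need + 1) 1) from rfl]
    rw [foldl_flatMap_of _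
        (fun d => (Hspec hi rest (need - d)).map ((acc ++ (PySem.Int.toStr d).toList ++ p) ++ ·)) _
        (fun o d _ => ih (need - d) _ o)]
    show _ = out ++ (Hspec hi (p :: rest) need).map _
    simp only [Hspec, List.map_flatMap, List.map_map]
    congr 1
    apply List.flatMap_congr  -- congruence over the range
    intro d _
    apply List.map_congr_left
    intro f _
    simp [List.append_assoc]

lemma Hspec_empty (hi : Int) (parts : List (List Char)) (m : Int)
    (h : m < 0 ∨ hi * (parts.length : Int) < m) : Hspec hi parts m = [] := by
  cases parts with
  | nil =>
    have hm : m ≠ 0 := by simp only [List.length_nil, Int.natCast_zero, mul_zero] at h; omega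
    simp [Hspec, hm]
  | cons p rest =>
    have hx : hi * (((p :: rest).length : Nat) : Int) = hi * (rest.length : Int) + hi := by
      simp only [List.length_cons]; push_cast; ring
    have hnil : min hi m + 1 ≤ max 0 (m - hi * (rest.length : Int)) := by
      rcases h with h | h
      · omega
      · rw [hx] at h; omega
    simp [Hspec, PySem.List.pyRange_one_eq_nil hnil]

lemma flatMap_pyRange_shrink {α : Type} (g : Int → List α) :
    ∀ (n : Nat) (a b a' b' : Int), (b - a).toNat = n → a ≤ a' → b' ≤ b →
      (∀ i, a ≤ i → i < b → (i < a' ∨ b' ≤ i) → g i = []) →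
      (PySem.List.pyRange a b 1).flatMap g = (PySem.List.pyRange a' b' 1).flatMap g := by
  intro n
  induction n with
  | zero =>
    intro a b a' b' hn h1 h2 _
    have hba : b ≤ a := by omega
    rw [PySem.List.pyRange_one_eq_nil hba, PySem.List.pyRange_one_eq_nil (by omega)]
  | succ n ih =>
    intro a b a' b' hn h1 h2 hz
    have hab : a < b := by omega
    rcases lt_or_ge a a' with hlt | hge
    · -- a is below the inner window: g a = [] and recurse
      rw [PySem.List.pyRange_one_cons hab, List.flatMap_cons,
          hz a le_rfl hab (Or.inl hlt), List.nil_append]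
      exact ih (a + 1) b a' b' (by omega) (by omega) h2
        (fun i hi1 hi2 hi3 => hz i (by omega) hi2 hi3)
    · have haa : a' = a := by omega
      subst haa
      rcases le_or_gt b' a' with hba' | hab'
      · -- inner window empty: every outer term is []
        rw [PySem.List.pyRange_one_eq_nil (by omega : b' ≤ a'), List.flatMap_nil]
        rw [List.flatMap_eq_nil_iff]
        intro i hi
        rw [PySem.List.mem_pyRange_one] at hi
        exact hz i hi.1 hi.2 (Or.inr (by omega))
      · -- peel one element off both sides
        rw [PySem.List.pyRange_one_cons hab, PySem.List.pyRange_one_cons hab',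
            List.flatMap_cons, List.flatMap_cons]
        congr 1
        exact ih (a' + 1) b (a' + 1) b' (by omega) le_rfl h2
          (fun i hi1 hi2 hi3 => hz i (by omega) hi2 (by omega))

lemma F_H (hi : Int) (parts : List (List Char)) :
    ∀ (p : List Char) (need : Int), (∀ q ∈ p :: parts, '?' ∉ q) →
      Fspec hi (joinQ (p :: parts)) need = (Hspec hi parts need).map (p ++ ·) := by
  induction parts with
  | nil =>
    intro p need h
    have hp : '?' ∉ p := h p List.mem_cons_self
    calc Fspec hi (joinQ [p]) need = Fspec hi (p ++ []) need := by simp [joinQ]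
      _ = (Fspec hi [] need).map (p ++ ·) := Fspec_prefix hi p [] need hp
      _ = (Hspec hi [] need).map (p ++ ·) := rfl
  | cons q rest ih =>
    intro p need h
    have hp : '?' ∉ p := h p List.mem_cons_self
    have hrest : ∀ r ∈ q :: rest, '?' ∉ r := fun r hr => h r (List.mem_cons_of_mem _ hr)
    have hjoin : joinQ (p :: q :: rest) = p ++ '?' :: joinQ (q :: rest) := rfl
    rw [hjoin, Fspec_prefix hi p _ need hp]
    congr 1
    -- remains: Fspec hi ('?' :: joinQ (q :: rest)) need = Hspec hi (q :: rest) need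
    show (if need < 0 then []
      else (PySem.List.pyRange 0 (hi + 1) 1).flatMap
        (fun i => (Fspec hi (joinQ (q :: rest)) (need - i)).map
          (fun f => (PySem.Int.toStr i).toList ++ f))) = Hspec hi (q :: rest) need
    by_cases hn : need < 0
    · rw [if_pos hn, Hspec_empty hi (q :: rest) need (Or.inl hn)]
    · rw [if_neg hn]
      have hterm : ∀ i : Int, (Fspec hi (joinQ (q :: rest)) (need - i)).map
            (fun f => (PySem.Int.toStr i).toList ++ f)
          = (Hspec hi rest (need - i)).map
            (fun f => (PySem.Int.toStr i).toList ++ q ++ f) := by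
        intro i
        rw [ih q (need - i) hrest, List.map_map]
        apply List.map_congr_left
        intro f _
        simp [List.append_assoc]
      simp only [hterm]
      show _ = (PySem.List.pyRange (max 0 (need - hi * ((rest.length : Nat) : Int)))
          (min hi need + 1) 1).flatMap _
      apply flatMap_pyRange_shrink _ ((hi + 1 - 0).toNat) _ _ _ _ rfl (le_max_left 0 _)
        (by omega)
      intro i h0 hib hcase
      rw [Hspec_empty hi rest (need - i) ?_, List.map_nil]
      rcases hcase with hlo | hhi
      · right; omega
      · left; omega

lemma mkParts_ne_nil (l : List Char) : mkParts l ≠ [] := by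
  cases l with
  | nil => simp [mkParts]
  | cons c t => unfold mkParts; split <;> simp

lemma joinQ_mkParts (l : List Char) : joinQ (mkParts l) = l := by
  induction l with
  | nil => rfl
  | cons c t ih =>
    rcases hmk : mkParts t with _ | ⟨p, ps⟩
    · exact absurd hmk (mkParts_ne_nil t)
    · by_cases hc : c = '?'
      · subst hc
        simp only [mkParts, hmk]
        show '?' :: joinQ (p :: ps) = '?' :: t
        rw [← hmk, ih]
      · simp only [mkParts, if_neg hc, hmk, List.headD_cons, List.tail_cons]
        cases ps with
        | nil =>
          show c :: p = c :: t
          have : joinQ (mkParts t) = t := ih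
          rw [hmk] at this
          exact congrArg (c :: ·) this
        | cons q r =>
          show (c :: p) ++ '?' :: joinQ (q :: r) = c :: t
          have : joinQ (mkParts t) = t := ih
          rw [hmk] at this
          rw [List.cons_append, ← this]
          rfl

lemma noQ_mkParts (l : List Char) : ∀ p ∈ mkParts l, '?' ∉ p := by
  induction l with
  | nil => intro p hp; simp [mkParts] at hp; simp [hp]
  | cons c t ih =>
    intro p hp
    rcases hmk : mkParts t with _ | ⟨q, ps⟩
    · exact absurd hmk (mkParts_ne_nil t)
    · by_cases hc : c = '?'
      · subst hc
        simp only [mkParts, hmk] at hp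
        rcases List.mem_cons.mp hp with h | h
        · simp [h]
        · exact ih p (hmk ▸ h)
      · simp only [mkParts, if_neg hc, hmk, List.headD_cons, List.tail_cons] at hp
        rcases List.mem_cons.mp hp with h | h
        · subst h
          intro hm
          rcases List.mem_cons.mp hm with h' | h'
          · exact hc h'.symm
          · exact ih q (hmk ▸ List.mem_cons_self) h'
        · exact ih p (hmk ▸ List.mem_cons_of_mem _ h)

lemma mkParts_noQ (l : List Char) (h : '?' ∉ l) : mkParts l = [l] := by
  induction l with
  | nil => rfl
  | cons c t ih =>
    have hc : c ≠ '?' := by intro hc; exact h (hc ▸ List.mem_cons_self)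
    have ht : '?' ∉ t := fun hm => h (List.mem_cons_of_mem _ hm)
    simp [mkParts, hc, ih ht]

lemma segsB_foldl (l : List Char) :
    ∀ (segs : List (List Char)) (cur : List Char),
      (let st := l.foldl (fun (p : List (List Char) × List Char) c =>
          if c = '?' then (p.1 ++ [p.2], []) else (p.1, p.2 ++ [c])) (segs, cur)
       st.1 ++ [st.2])
      = segs ++ (cur ++ (mkParts l).headD []) :: (mkParts l).tail := by
  induction l with
  | nil => intro segs cur; simp [mkParts]
  | cons c t ih =>
    intro segs cur
    rcases hmk : mkParts t with _ | ⟨p, ps⟩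
    · exact absurd hmk (mkParts_ne_nil t)
    · by_cases hc : c = '?'
      · subst hc
        simp only [mkParts, hmk, List.headD_cons, List.tail_cons]
        rw [List.foldl_cons, if_pos rfl]
        rw [ih (segs ++ [cur]) [], hmk]
        simp
      · simp only [mkParts, if_neg hc, hmk, List.headD_cons, List.tail_cons]
        rw [List.foldl_cons, if_neg hc]
        rw [ih segs (cur ++ [c]), hmk]
        simp

lemma segsB_eq_mkParts (l : List Char) : segsB l = mkParts l := by
  have h := segsB_foldl l [] []
  rcases hmk : mkParts l with _ | ⟨p, ps⟩
  · exact absurd hmk (mkParts_ne_nil l)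
  · rw [hmk] at h
    simpa [segsB] using h

lemma foldl_if_add (p : Char → Bool) (f : Char → Int) (l : List Char) :
    ∀ a : Int, l.foldl (fun a c => if p c then a + f c else a) a
      = a + ((l.filter p).map f).sum := by
  induction l with
  | nil => simp
  | cons c t ih =>
    intro a
    by_cases hc : p c <;> simp [List.foldl_cons, hc, ih, add_assoc]

theorem work_sched_spec : Claim_equal_work_sched := by
  intro s mw md _ hpre
  show work_sched s mw md = work_sched_alt s mw md
  show (recurseA s.toList mw md 0 []
      (s.toList.foldl (fun a c => if PySem.Chars.isdigit c then a + ((c.toNat : Int) - 48) else a) 0)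
      []).map String.ofList
    = (goB (min md 9) (segsB s.toList).tail
      (mw - ((s.toList.filter (fun c => PySem.Chars.isdigit c)).map (fun c => ((c.toNat : Int) - 48))).sum)
      ((segsB s.toList).headD []) []).map String.ofList
  rw [foldl_if_add, segsB_eq_mkParts, Int.zero_add]
  congr 1
  set L := s.toList with hL
  set need := mw - ((L.filter (fun c => PySem.Chars.isdigit c)).map (fun c => ((c.toNat : Int) - 48))).sum with hneed
  have hA : recurseA L mw md 0 [] (mw - need) []
      = (Fspec md L need).map (fun f => f) := by
    have := recurseA_eq L mw md L.length 0 [] (mw - need) [] (by omega) rfl (by omega)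
      (fun c hc hc' => hpre (hc' ▸ (by simpa using hc)))
    simpa using this
  have hB : goB (min md 9) (mkParts L).tail need ((mkParts L).headD []) []
      = (Hspec (min md 9) (mkParts L).tail need).map (((mkParts L).headD []) ++ ·) := by
    simpa using goB_eq (min md 9) (mkParts L).tail need ((mkParts L).headD []) []
  have hsum : (List.map (fun c => ((c.toNat : Int) - 48)) (List.filter PySem.Chars.isdigit L)).sum
      = mw - need := by rw [hneed]; ring
  rw [hsum, hA, hB, show (fun f : List Char => f) = id from rfl, List.map_id]
  rcases hmk : mkParts L with _ | ⟨p, rest⟩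
  · exact absurd hmk (mkParts_ne_nil L)
  · by_cases hin : '?' ∈ L
    · have hmin : min md 9 = md := min_eq_left (hpre hin)
      rw [hmin, List.headD_cons, List.tail_cons]
      rw [← joinQ_mkParts L, hmk]
      exact F_H md rest p need (hmk ▸ noQ_mkParts L)
    · have hone : mkParts L = [L] := mkParts_noQ L hin
      have h2 : p :: rest = [L] := hmk ▸ hone
      obtain ⟨rfl, rfl⟩ := List.cons.inj h2
      rw [List.headD_cons, List.tail_cons]
      have hpref := Fspec_prefix md L [] need hin
      rw [List.append_nil] at hpref
      rw [hpref]
      rfl
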